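-- pv_equiv track=rewrite | github.com/srihariprasad-r/workable-code | Practice problems/arrays/triplets_practise_questions/tripletsumlesseqk.py | tripletsumlessthanK
-- ===== SOURCE A (Python) =====
-- def tripletsumlessthanK(arr, k):
--     arr.sort()
--     diff_sum = 0
--     res = []
--
--     for i in range(len(arr)-2):
--         diff_sum = k - arr[i]
--         j = i + 1
--         m = len(arr)-1
--         while j < m:
--             if arr[j] + arr[m] <= diff_sum:
--                 res.append((arr[i], arr[j], arr[m]))
--                 j += 1
--             else:
--                 m -= 1
--
--
--     return res
-- ===== SOURCE B (Python) =====
-- def _bisect_right(a, x):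
--     """Index of the first element of sorted list a strictly greater than x."""
--     lo, hi = 0, len(a)
--     while lo < hi:
--         mid = (lo + hi) // 2
--         if a[mid] <= x:
--             lo = mid + 1
--         else:
--             hi = mid
--     return lo
--
--
-- def tripletsumlessthanK(arr, k):
--     # Sorts arr in place, like the original.
--     arr.sort()
--     n = len(arr)
--     res = []
--     for i in range(n - 2):
--         target = k - arr[i]
--         j = i + 1
--         while j < n:
--             m = _bisect_right(arr, target - arr[j]) - 1
--             if m <= j:
--                 break
--             res.append((arr[i], arr[j], arr[m]))
--             j += 1
--     return res
-- ===== Notes on version B (the rewrite author's own statement) =====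
-- stated objective: alternative
-- what changed: The inner two-pointer staircase (j up, m down, one step per iteration) is replaced by a binary search: for each j the emitted partner is the largest index m with arr[j]+arr[m] <= k-arr[i], found by a hand-written bisect_right, breaking as soon as m <= j.
import Mathlib
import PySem

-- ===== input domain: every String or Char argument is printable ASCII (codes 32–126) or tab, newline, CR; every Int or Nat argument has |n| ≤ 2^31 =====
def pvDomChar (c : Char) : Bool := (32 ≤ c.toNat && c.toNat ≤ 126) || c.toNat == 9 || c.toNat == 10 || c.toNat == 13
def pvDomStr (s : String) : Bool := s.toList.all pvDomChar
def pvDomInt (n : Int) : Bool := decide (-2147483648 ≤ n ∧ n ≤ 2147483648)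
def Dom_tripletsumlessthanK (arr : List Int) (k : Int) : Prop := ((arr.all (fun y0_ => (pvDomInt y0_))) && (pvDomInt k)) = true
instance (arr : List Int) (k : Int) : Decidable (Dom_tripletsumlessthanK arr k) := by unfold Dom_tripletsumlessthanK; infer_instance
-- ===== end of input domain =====

-- B replaces A's inner two-pointer staircase by, for each j, a binary search for the
-- largest partner index (objective: alternative algorithm, same outputs). Both Pythons
-- sort `arr` in place; the equivalence proved here is about the return value.

-- ===== PORT A =====
-- A's inner `while j < m` loop; appended triples returned as a list, state (j, m) as in A.
def pvWhileA (a : List Int) (ai t : Int) (j m : Nat) : List (Int × Int × Int) :=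
  if h : j < m then
    if a.getD j 0 + a.getD m 0 ≤ t then
      (ai, a.getD j 0, a.getD m 0) :: pvWhileA a ai t (j + 1) m
    else
      pvWhileA a ai t j (m - 1)
  else []
termination_by m - j
decreasing_by all_goals omega

def tripletsumlessthanK (arr : List Int) (k : Int) : List (Int × Int × Int) :=
  let a := PySem.List.sorted arr (fun x => x) false
  (List.range (a.length - 2)).foldl
    (fun res i => res ++ pvWhileA a (a.getD i 0) (k - a.getD i 0) (i + 1) (a.length - 1)) []

-- ===== PORT B =====
-- Source B's hand-written _bisect_right: binary search loop on (lo, hi).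
def pvBisectGo (a : List Int) (x : Int) (lo hi : Nat) : Nat :=
  if h : lo < hi then
    let mid := (lo + hi) / 2
    if a.getD mid 0 ≤ x then pvBisectGo a x (mid + 1) hi else pvBisectGo a x lo mid
  else lo
termination_by hi - lo
decreasing_by all_goals omega

def pvBisectRight (a : List Int) (x : Int) : Nat := pvBisectGo a x 0 a.length

-- B's inner `while j < n` loop with its early break.
def pvWhileB (a : List Int) (ai t : Int) (j : Nat) : List (Int × Int × Int) :=
  if h : j < a.length then
    let m : Int := (pvBisectRight a (t - a.getD j 0) : Int) - 1
    if m ≤ (j : Int) then []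
    else (ai, a.getD j 0, a.getD m.toNat 0) :: pvWhileB a ai t (j + 1)
  else []
termination_by a.length - j
decreasing_by omega

def tripletsumlessthanK_alt (arr : List Int) (k : Int) : List (Int × Int × Int) :=
  let a := PySem.List.sorted arr (fun x => x) false
  (List.range (a.length - 2)).foldl
    (fun res i => res ++ pvWhileB a (a.getD i 0) (k - a.getD i 0) (i + 1)) []

-- ===== PRECONDITION & SPEC =====
def Spec_tripletsumlessthanK (arr : List Int) (k : Int) (out : List (Int × Int × Int)) : Prop := out = tripletsumlessthanK_alt arr k
instance (arr : List Int) (k : Int) (out : List (Int × Int × Int)) : Decidable (Spec_tripletsumlessthanK arr k out) := by unfold Spec_tripletsumlessthanK; infer_instance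

-- ===== CLAIM (what is proved, stated in full; the proofs are below) =====
def Claim_equal_tripletsumlessthanK : Prop := ∀ (arr : List Int) (k : Int), Dom_tripletsumlessthanK arr k → Spec_tripletsumlessthanK arr k (tripletsumlessthanK arr k)

-- ===== LEMMAS AND PROOFS =====

-- getD is getElem in range
theorem pvGetD_eq (a : List Int) {q : Nat} (hq : q < a.length) : a.getD q 0 = a[q] := by
  simp [List.getD_eq_getElem?_getD, List.getElem?_eq_getElem hq]

-- monotonicity of a sorted list, phrased with getD
theorem pvMono (a : List Int) (hs : a.Pairwise (· ≤ ·)) {p q : Nat}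
    (hpq : p ≤ q) (hq : q < a.length) : a.getD p 0 ≤ a.getD q 0 := by
  rcases Nat.lt_or_ge p q with h | h
  · rw [pvGetD_eq a (lt_trans h hq), pvGetD_eq a hq]
    exact List.pairwise_iff_getElem.mp hs p q (lt_trans h hq) hq h
  · have : p = q := le_antisymm hpq h
    subst this; rfl

-- specification of the hand-written binary search
theorem pvBisectGo_spec (a : List Int) (x : Int) (hs : a.Pairwise (· ≤ ·)) :
    ∀ fuel lo hi, hi - lo ≤ fuel → lo ≤ hi → hi ≤ a.length →
    (∀ q, q < lo → a.getD q 0 ≤ x) →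
    (∀ q, hi ≤ q → q < a.length → x < a.getD q 0) →
    lo ≤ pvBisectGo a x lo hi ∧ pvBisectGo a x lo hi ≤ hi ∧
    (∀ q, q < pvBisectGo a x lo hi → a.getD q 0 ≤ x) ∧
    (∀ q, pvBisectGo a x lo hi ≤ q → q < a.length → x < a.getD q 0) := by
  intro fuel
  induction fuel with
  | zero =>
    intro lo hi hfuel hle hhi hlo? hhi?
    have : lo = hi := by omega
    subst this
    rw [pvBisectGo]; simp only [lt_irrefl, dite_false]
    exact ⟨le_refl _, le_refl _, hlo?, hhi?⟩
  | succ f ih =>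
    intro lo hi hfuel hle hhi hlo? hhi?
    rw [pvBisectGo]
    by_cases h : lo < hi
    · simp only [dif_pos h]
      set mid := (lo + hi) / 2 with hmid
      have hmlt : mid < hi := by omega
      have hmge : lo ≤ mid := by omega
      by_cases hc : a.getD mid 0 ≤ x
      · simp only [if_pos hc]
        obtain ⟨h1, h2, h3, h4⟩ := ih (mid + 1) hi (by omega) (by omega) hhi
          (fun q hq => by
            rcases Nat.lt_or_ge q lo with h1 | h1
            · exact hlo? q h1
            · exact le_trans (pvMono a hs (by omega) (by omega)) hc)
          hhi?
        exact ⟨by omega, h2, h3, h4⟩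
      · simp only [if_neg hc]
        obtain ⟨h1, h2, h3, h4⟩ := ih lo mid (by omega) hmge (by omega) hlo?
          (fun q hq hq' => lt_of_lt_of_le (lt_of_not_ge hc) (pvMono a hs hq hq'))
        exact ⟨h1, by omega, h3, h4⟩
    · simp only [dif_neg h]
      have : lo = hi := by omega
      subst this
      exact ⟨le_refl _, le_refl _, hlo?, hhi?⟩

theorem pvBisectRight_spec (a : List Int) (x : Int) (hs : a.Pairwise (· ≤ ·)) :
    pvBisectRight a x ≤ a.length ∧
    (∀ q, q < pvBisectRight a x → a.getD q 0 ≤ x) ∧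
    (∀ q, pvBisectRight a x ≤ q → q < a.length → x < a.getD q 0) := by
  have h := pvBisectGo_spec a x hs a.length 0 a.length (by omega) (by omega) (le_refl _)
    (fun q hq => absurd hq (Nat.not_lt_zero q))
    (fun q hq hq' => absurd hq' (by omega))
  exact ⟨h.2.1, h.2.2.1, h.2.2.2⟩

-- the key inner-loop equivalence: A's two-pointer walk emits exactly B's bisect hits
theorem pvWhile_eq (a : List Int) (hs : a.Pairwise (· ≤ ·)) (ai t : Int) :
    ∀ fuel j m, (m - j) + (a.length - j) ≤ fuel → j ≤ m → m < a.length →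
    (∀ q, m < q → q < a.length → t - a.getD j 0 < a.getD q 0) →
    pvWhileA a ai t j m = pvWhileB a ai t j := by
  intro fuel
  induction fuel with
  | zero => intro j m hfuel hjm hm hinv; omega
  | succ f ih =>
    intro j m hfuel hjm hm hinv
    have hjn : j < a.length := lt_of_le_of_lt hjm hm
    by_cases h : j < m
    · rw [pvWhileA]; simp only [dif_pos h]
      by_cases hc : a.getD j 0 + a.getD m 0 ≤ t
      · -- emit: B's bisect lands exactly on m
        obtain ⟨hb1, hb2, hb3⟩ := pvBisectRight_spec a (t - a.getD j 0) hs
        set r := pvBisectRight a (t - a.getD j 0) with hr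
        have hrm : r = m + 1 := by
          rcases Nat.lt_or_ge m r with h1 | h1
          · by_contra hne
            have h2 : m + 1 < r := by omega
            have h3 : m + 1 < a.length := by omega
            have := hb2 (m + 1) h2
            have := hinv (m + 1) (by omega) h3
            omega
          · have := hb3 m h1 hm
            omega
        rw [if_pos hc]
        rw [pvWhileB]; simp only [dif_pos hjn]
        rw [← hr]
        have hne : ¬ ((r : Int) - 1 ≤ (j : Int)) := by rw [hrm]; push_cast; omega
        simp only [if_neg hne]
        have htn : ((r : Int) - 1).toNat = m := by rw [hrm]; omega
        rw [htn]
        congr 1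
        exact ih (j + 1) m (by omega) (by omega) hm
          (fun q hq hq' =>
            lt_of_le_of_lt
              (sub_le_sub_left (pvMono a hs (Nat.le_succ j) (by omega)) t)
              (hinv q hq hq'))
      · rw [if_neg hc]
        exact ih j (m - 1) (by omega) (by omega) (by omega)
          (fun q hq hq' => by
            rcases Nat.lt_or_ge m q with h1 | h1
            · exact hinv q h1 hq'
            · have : q = m := by omega
              subst this; omega)
    · -- j = m: A's loop ends; B's bisect gives m ≤ j, so B breaks
      have hjme : j = m := by omega
      rw [pvWhileA]; simp only [dif_neg h]
      obtain ⟨hb1, hb2, hb3⟩ := pvBisectRight_spec a (t - a.getD j 0) hs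
      set r := pvBisectRight a (t - a.getD j 0) with hr
      rw [pvWhileB]; simp only [dif_pos hjn]
      rw [← hr]
      have hrle : r ≤ j + 1 := by
        by_contra hgt
        have h2 : j + 1 < r := by omega
        have h3 : j + 1 < a.length := by omega
        have := hb2 (j + 1) h2
        have := hinv (j + 1) (by omega) h3
        omega
      have hle2 : ((r : Int) - 1 ≤ (j : Int)) := by omega
      simp [hle2]

-- ===== VERDICT (by name: the statement is the Claim_ definition above) =====
theorem tripletsumlessthanK_spec : Claim_equal_tripletsumlessthanK := by
  intro arr k _
  unfold Spec_tripletsumlessthanK tripletsumlessthanK tripletsumlessthanK_alt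
  set a := PySem.List.sorted arr (fun x => x) false with ha
  have hs : a.Pairwise (· ≤ ·) := PySem.List.sorted_pairwise arr (fun x => x)
  apply PySem.List.foldl_congr_mem
  intro res i hi
  have hi' : i < a.length - 2 := List.mem_range.mp hi
  congr 1
  exact pvWhile_eq a hs (a.getD i 0) (k - a.getD i 0)
    ((a.length - 1 - (i + 1)) + (a.length - (i + 1))) (i + 1) (a.length - 1)
    (le_refl _) (by omega) (by omega)
    (fun q hq hq' => absurd hq' (by omega))
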